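-- pv_equiv track=rewrite | github.com/28ft/Compiler | firstFollow.py | split_production
-- ===== SOURCE A (Python) =====
-- def split_production(prod):
--     """تجزیه رشته تولید به نمادها - نسخه اصلاح‌شده"""
--     symbols = []
--     i = 0
--     n = len(prod)
--
--     while i < n:
--         # نادیده گرفتن فاصله
--         if prod[i].isspace():
--             i += 1
--             continue
--
--         # شناسه‌ها و اعداد
--         if prod[i].isalpha():
--             start = i
--             while i < n and (prod[i].isalnum() or prod[i] == '_' or prod[i] == "'"):
--                 i += 1
--             symbols.append(prod[start:i])
--
--         # اعداد
--         elif prod[i].isdigit():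
--             start = i
--             while i < n and prod[i].isdigit():
--                 i += 1
--             symbols.append(prod[start:i])
--
--         # سایر کاراکترها
--         else:
--             symbols.append(prod[i])
--             i += 1
--
--     return symbols
-- ===== SOURCE B (Python) =====
-- def split_production(prod):
--     """Single streaming pass: a tiny state machine folded over the characters,
--     with an explicit (buffer, mode) state instead of indices and nested scans."""
--     symbols = []
--     buf = ""
--     mode = None  # 'A' = inside identifier, 'D' = inside number
--     for c in prod:
--         if mode == 'A' and (c.isalnum() or c == '_' or c == "'"):
--             buf += c
--             continue
--         if mode == 'D' and c.isdigit():
--             buf += c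
--             continue
--         if buf:
--             symbols.append(buf)
--             buf, mode = "", None
--         if c.isspace():
--             continue
--         if c.isalpha():
--             buf, mode = c, 'A'
--         elif c.isdigit():
--             buf, mode = c, 'D'
--         else:
--             symbols.append(c)
--     if buf:
--         symbols.append(buf)
--     return symbols
-- ===== Notes on version B (the rewrite author's own statement) =====
-- stated objective: alternative
-- what changed: Replaces A's index-based outer while with nested inner scanning loops and slicing by a single streaming fold over the characters that maintains an explicit (buffer, mode) token-DFA state; no indices, no slices, no nested loops.
import Mathlib
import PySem

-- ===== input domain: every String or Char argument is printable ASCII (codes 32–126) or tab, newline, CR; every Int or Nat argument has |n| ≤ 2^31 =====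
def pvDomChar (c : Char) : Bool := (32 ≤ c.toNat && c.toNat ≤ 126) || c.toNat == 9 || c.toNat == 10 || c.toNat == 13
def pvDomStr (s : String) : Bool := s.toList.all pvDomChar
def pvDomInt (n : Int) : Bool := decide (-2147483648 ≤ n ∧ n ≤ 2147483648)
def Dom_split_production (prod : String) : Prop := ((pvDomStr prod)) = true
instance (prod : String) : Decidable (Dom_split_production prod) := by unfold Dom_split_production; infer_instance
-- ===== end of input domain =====

-- B tokenizes by a single streaming fold with an explicit (buffer, mode) state instead of
-- A's index-based outer while with nested inner scans and slicing; return values agree (proved below).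

-- ===== PORT A =====
-- Python's isspace/isalpha/isalnum/isdigit agree with Char.isWhitespace/isAlpha/isAlphanum/isDigit
-- on the ASCII domain (codes 32–126, tab, LF, CR) these theorems are about.

-- the identifier-continuation test of A's inner while: isalnum or '_' or "'"
def pvIdentCont (c : Char) : Bool := c.isAlphanum || c == '_' || c == '\''

-- inner while of the identifier branch: advances i while i < n and pvIdentCont prod[i];
-- fuel = n - i is a pure totality guard (each step does i+1), it never changes the result
def pvScanIdentGo (cs : List Char) (n : Nat) : Nat → Nat → Nat
  | 0, i => i
  | fuel+1, i =>
      if i < n ∧ pvIdentCont (cs.getD i ' ') = true then pvScanIdentGo cs n fuel (i+1) else i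

def pvScanIdent (cs : List Char) (n i : Nat) : Nat := pvScanIdentGo cs n (n - i) i

-- inner while of the number branch: advances i while i < n and prod[i].isdigit()
def pvScanDigitGo (cs : List Char) (n : Nat) : Nat → Nat → Nat
  | 0, i => i
  | fuel+1, i =>
      if i < n ∧ (cs.getD i ' ').isDigit = true then pvScanDigitGo cs n fuel (i+1) else i

def pvScanDigit (cs : List Char) (n i : Nat) : Nat := pvScanDigitGo cs n (n - i) i

-- outer while of A; fuel = n - i again only guards totality (every iteration strictly
-- advances i); slices prod[start:i] are exact as take/drop since 0 ≤ start ≤ i ≤ n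
def pvLoopA (cs : List Char) (n : Nat) : Nat → Nat → List String → List String
  | 0, _, symbols => symbols
  | fuel+1, i, symbols =>
      if i < n then
        let c := cs.getD i ' '
        if c.isWhitespace then pvLoopA cs n fuel (i+1) symbols
        else if c.isAlpha then
          let j := pvScanIdent cs n i
          pvLoopA cs n fuel j (symbols ++ [String.mk ((cs.drop i).take (j - i))])
        else if c.isDigit then
          let j := pvScanDigit cs n i
          pvLoopA cs n fuel j (symbols ++ [String.mk ((cs.drop i).take (j - i))])
        else pvLoopA cs n fuel (i+1) (symbols ++ [String.mk [c]])
      else symbols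

def split_production (prod : String) : List String :=
  pvLoopA prod.toList prod.toList.length prod.toList.length 0 []

-- ===== PORT B =====
-- state = (symbols so far, current buffer, mode: some true = identifier, some false = number)
def pvStepB (st : List String × List Char × Option Bool) (c : Char) :
    List String × List Char × Option Bool :=
  let (symbols, buf, mode) := st
  if mode = some true ∧ pvIdentCont c = true then (symbols, buf ++ [c], mode)
  else if mode = some false ∧ c.isDigit = true then (symbols, buf ++ [c], mode)
  else
    let symbols := if buf ≠ [] then symbols ++ [String.mk buf] else symbols
    if c.isWhitespace then (symbols, [], none)
    else if c.isAlpha then (symbols, [c], some true)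
    else if c.isDigit then (symbols, [c], some false)
    else (symbols ++ [String.mk [c]], [], none)

-- final 'if buf: symbols.append(buf)'
def pvFinishB (st : List String × List Char × Option Bool) : List String :=
  if st.2.1 ≠ [] then st.1 ++ [String.mk st.2.1] else st.1

def split_production_alt (prod : String) : List String :=
  pvFinishB (prod.toList.foldl pvStepB ([], [], none))

-- ===== PRECONDITION & SPEC =====
def Spec_split_production (prod : String) (out : List String) : Prop := out = split_production_alt prod
instance (prod : String) (out : List String) : Decidable (Spec_split_production prod out) := by unfold Spec_split_production; infer_instance

-- ===== CLAIM (what is proved, stated in full; the proofs are below) =====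
def Claim_equal_split_production : Prop := ∀ (prod : String), Dom_split_production prod → Spec_split_production prod (split_production prod)

-- ===== LEMMAS AND PROOFS =====

theorem pvScanIdentGo_eq (cs : List Char) (fuel i : Nat) (h : cs.length - i ≤ fuel) :
    pvScanIdentGo cs cs.length fuel i = i + ((cs.drop i).takeWhile pvIdentCont).length := by
  induction fuel generalizing i with
  | zero =>
      rw [List.drop_eq_nil_of_le (by omega)]
      simp [pvScanIdentGo]
  | succ fuel ih =>
      rw [pvScanIdentGo]
      by_cases hc : i < cs.length ∧ pvIdentCont (cs.getD i ' ') = true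
      · obtain ⟨h1, h2⟩ := hc
        rw [if_pos ⟨h1, h2⟩, ih (i+1) (by omega)]
        rw [List.getD_eq_getElem?_getD, List.getElem?_eq_getElem h1] at h2
        rw [List.drop_eq_getElem_cons h1]
        simp only [Option.getD_some] at h2
        rw [List.takeWhile_cons_of_pos h2]
        simp; omega
      · rw [if_neg hc]
        rcases Nat.lt_or_ge i cs.length with h1 | h1
        · have h2 : ¬ pvIdentCont (cs.getD i ' ') = true := by tauto
          rw [List.getD_eq_getElem?_getD, List.getElem?_eq_getElem h1] at h2
          simp only [Option.getD_some] at h2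
          rw [List.drop_eq_getElem_cons h1, List.takeWhile_cons_of_neg h2]
          simp
        · rw [List.drop_eq_nil_of_le h1]; simp

theorem pvScanDigitGo_eq (cs : List Char) (fuel i : Nat) (h : cs.length - i ≤ fuel) :
    pvScanDigitGo cs cs.length fuel i = i + ((cs.drop i).takeWhile Char.isDigit).length := by
  induction fuel generalizing i with
  | zero =>
      rw [List.drop_eq_nil_of_le (by omega)]
      simp [pvScanDigitGo]
  | succ fuel ih =>
      rw [pvScanDigitGo]
      by_cases hc : i < cs.length ∧ (cs.getD i ' ').isDigit = true
      · obtain ⟨h1, h2⟩ := hc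
        rw [if_pos ⟨h1, h2⟩, ih (i+1) (by omega)]
        rw [List.getD_eq_getElem?_getD, List.getElem?_eq_getElem h1] at h2
        rw [List.drop_eq_getElem_cons h1]
        simp only [Option.getD_some] at h2
        rw [List.takeWhile_cons_of_pos h2]
        simp; omega
      · rw [if_neg hc]
        rcases Nat.lt_or_ge i cs.length with h1 | h1
        · have h2 : ¬ (cs.getD i ' ').isDigit = true := by tauto
          rw [List.getD_eq_getElem?_getD, List.getElem?_eq_getElem h1] at h2
          simp only [Option.getD_some] at h2
          rw [List.drop_eq_getElem_cons h1, List.takeWhile_cons_of_neg h2]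
          simp
        · rw [List.drop_eq_nil_of_le h1]; simp

theorem pvScanIdent_eq (cs : List Char) (i : Nat) :
    pvScanIdent cs cs.length i = i + ((cs.drop i).takeWhile pvIdentCont).length :=
  pvScanIdentGo_eq cs (cs.length - i) i (le_refl _)

theorem pvScanDigit_eq (cs : List Char) (i : Nat) :
    pvScanDigit cs cs.length i = i + ((cs.drop i).takeWhile Char.isDigit).length :=
  pvScanDigitGo_eq cs (cs.length - i) i (le_refl _)

theorem pvIdentRun (symbols : List String) (buf : List Char) (hb : buf ≠ []) (cs : List Char) :
    pvFinishB (cs.foldl pvStepB (symbols, buf, some true)) =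
      pvFinishB ((cs.dropWhile pvIdentCont).foldl pvStepB
        (symbols ++ [String.mk (buf ++ cs.takeWhile pvIdentCont)], [], none)) := by
  induction cs generalizing symbols buf with
  | nil => simp [pvFinishB, hb]
  | cons c cs ih =>
      by_cases hp : pvIdentCont c = true
      · have hstep : pvStepB (symbols, buf, some true) c = (symbols, buf ++ [c], some true) := by
          simp [pvStepB, hp]
        simp only [List.foldl_cons, hstep, List.takeWhile_cons, hp, if_pos, List.dropWhile_cons_of_pos hp]
        rw [ih symbols (buf ++ [c]) (by simp)]
        simp
      · have hstep : pvStepB (symbols, buf, some true) c =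
            pvStepB (symbols ++ [String.mk buf], [], none) c := by
          simp [pvStepB, hp, hb]
        simp only [List.foldl_cons, hstep, List.takeWhile_cons, List.dropWhile_cons_of_neg (by simpa using hp)]
        simp [hp]

theorem pvDigitRun (symbols : List String) (buf : List Char) (hb : buf ≠ []) (cs : List Char) :
    pvFinishB (cs.foldl pvStepB (symbols, buf, some false)) =
      pvFinishB ((cs.dropWhile Char.isDigit).foldl pvStepB
        (symbols ++ [String.mk (buf ++ cs.takeWhile Char.isDigit)], [], none)) := by
  induction cs generalizing symbols buf with
  | nil => simp [pvFinishB, hb]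
  | cons c cs ih =>
      by_cases hp : c.isDigit = true
      · have hstep : pvStepB (symbols, buf, some false) c = (symbols, buf ++ [c], some false) := by
          simp [pvStepB, hp]
        simp only [List.foldl_cons, hstep, List.takeWhile_cons, hp, if_pos, List.dropWhile_cons_of_pos hp]
        rw [ih symbols (buf ++ [c]) (by simp)]
        simp
      · have hstep : pvStepB (symbols, buf, some false) c =
            pvStepB (symbols ++ [String.mk buf], [], none) c := by
          simp [pvStepB, hp, hb]
        simp only [List.foldl_cons, hstep, List.takeWhile_cons, List.dropWhile_cons_of_neg (by simpa using hp)]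
        simp [hp]

theorem pvTakePrefix (p : Char → Bool) (l : List Char) (k : Nat) (hk : k = (l.takeWhile p).length) :
    l.take k = l.takeWhile p := by
  subst hk
  nth_rewrite 2 [← List.takeWhile_append_dropWhile (p := p) (l := l)]
  exact List.take_left

theorem pvDropSuffix (p : Char → Bool) (l : List Char) (k : Nat) (hk : k = (l.takeWhile p).length) :
    l.drop k = l.dropWhile p := by
  subst hk
  nth_rewrite 2 [← List.takeWhile_append_dropWhile (p := p) (l := l)]
  exact List.drop_left

theorem pvMain (cs : List Char) (fuel i : Nat) (hf : cs.length - i ≤ fuel) (symbols : List String) :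
    pvLoopA cs cs.length fuel i symbols =
      pvFinishB ((cs.drop i).foldl pvStepB (symbols, [], none)) := by
  induction fuel generalizing i symbols with
  | zero =>
      rw [List.drop_eq_nil_of_le (by omega)]
      simp [pvLoopA, pvFinishB]
  | succ fuel ih =>
      rw [pvLoopA]
      by_cases hi : i < cs.length
      · rw [if_pos hi]
        have hc : cs[i] = cs.getD i ' ' := by
          simp [List.getD_eq_getElem?_getD, List.getElem?_eq_getElem hi]
        have hdrop : cs.drop i = cs[i] :: cs.drop (i+1) := List.drop_eq_getElem_cons hi
        by_cases hws : (cs.getD i ' ').isWhitespace = true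
        · rw [if_pos hws, hdrop]
          have hstep : pvStepB (symbols, [], none) cs[i] = (symbols, [], none) := by
            have hws2 : cs[i].isWhitespace = true := by rw [hc]; exact hws
            simp [pvStepB, hws2]
          simp only [List.foldl_cons, hstep]
          exact ih (i+1) (by omega) symbols
        · rw [if_neg hws]
          by_cases hA : (cs.getD i ' ').isAlpha = true
          · rw [if_pos hA]
            have hA2 : cs[i].isAlpha = true := by rw [hc]; exact hA
            have hpc : pvIdentCont cs[i] = true := by
              simp only [pvIdentCont, Char.isAlphanum, Bool.or_eq_true]
              exact Or.inl (Or.inl (Or.inl hA2))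
            have hj : pvScanIdent cs cs.length i =
                i + ((cs.drop i).takeWhile pvIdentCont).length := pvScanIdent_eq cs i
            have htw : (cs.drop i).takeWhile pvIdentCont =
                cs[i] :: (cs.drop (i+1)).takeWhile pvIdentCont := by
              rw [hdrop, List.takeWhile_cons_of_pos hpc]
            have hlen : (cs.drop i).length = cs.length - i := List.length_drop ..
            have htwle : ((cs.drop i).takeWhile pvIdentCont).length ≤ cs.length - i := by
              have := (List.takeWhile_prefix (p := pvIdentCont) (l := cs.drop i)).length_le
              omega
            have htwpos : 1 ≤ ((cs.drop i).takeWhile pvIdentCont).length := by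
              rw [htw]; simp
            have hslice : (cs.drop i).take (pvScanIdent cs cs.length i - i) =
                (cs.drop i).takeWhile pvIdentCont := by
              apply pvTakePrefix; omega
            have hdw : cs.drop (pvScanIdent cs cs.length i) =
                (cs.drop (i+1)).dropWhile pvIdentCont := by
              have h1 : cs.drop (pvScanIdent cs cs.length i) =
                  (cs.drop i).drop (pvScanIdent cs cs.length i - i) := by
                rw [List.drop_drop]; congr 1; omega
              rw [h1, pvDropSuffix pvIdentCont (cs.drop i) _ (by omega), hdrop,
                List.dropWhile_cons_of_pos hpc]
            rw [ih (pvScanIdent cs cs.length i) (by omega), hslice, htw, hdw, hdrop]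
            have hws2 : cs[i].isWhitespace = false := by rw [hc]; simpa using hws
            have hA2 : cs[i].isAlpha = true := by rw [hc]; exact hA
            have hstep : pvStepB (symbols, [], none) cs[i] = (symbols, [cs[i]], some true) := by
              simp [pvStepB, hws2, hA2]
            simp only [List.foldl_cons, hstep]
            rw [pvIdentRun symbols [cs[i]] (by simp) (cs.drop (i+1))]
            simp
          · rw [if_neg hA]
            by_cases hD : (cs.getD i ' ').isDigit = true
            · rw [if_pos hD]
              have hpc : cs[i].isDigit = true := by rw [hc]; exact hD
              have hj : pvScanDigit cs cs.length i =
                  i + ((cs.drop i).takeWhile Char.isDigit).length := pvScanDigit_eq cs i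
              have htw : (cs.drop i).takeWhile Char.isDigit =
                  cs[i] :: (cs.drop (i+1)).takeWhile Char.isDigit := by
                rw [hdrop, List.takeWhile_cons_of_pos hpc]
              have hlen : (cs.drop i).length = cs.length - i := List.length_drop ..
              have htwle : ((cs.drop i).takeWhile Char.isDigit).length ≤ cs.length - i := by
                have := (List.takeWhile_prefix (p := Char.isDigit) (l := cs.drop i)).length_le
                omega
              have htwpos : 1 ≤ ((cs.drop i).takeWhile Char.isDigit).length := by
                rw [htw]; simp
              have hslice : (cs.drop i).take (pvScanDigit cs cs.length i - i) =
                  (cs.drop i).takeWhile Char.isDigit := by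
                apply pvTakePrefix; omega
              have hdw : cs.drop (pvScanDigit cs cs.length i) =
                  (cs.drop (i+1)).dropWhile Char.isDigit := by
                have h1 : cs.drop (pvScanDigit cs cs.length i) =
                    (cs.drop i).drop (pvScanDigit cs cs.length i - i) := by
                  rw [List.drop_drop]; congr 1; omega
                rw [h1, pvDropSuffix Char.isDigit (cs.drop i) _ (by omega), hdrop,
                  List.dropWhile_cons_of_pos hpc]
              rw [ih (pvScanDigit cs cs.length i) (by omega), hslice, htw, hdw, hdrop]
              have hws2 : cs[i].isWhitespace = false := by rw [hc]; simpa using hws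
              have hA2 : cs[i].isAlpha = false := by rw [hc]; simpa using hA
              have hstep : pvStepB (symbols, [], none) cs[i] = (symbols, [cs[i]], some false) := by
                simp [pvStepB, hws2, hA2, hpc]
              simp only [List.foldl_cons, hstep]
              rw [pvDigitRun symbols [cs[i]] (by simp) (cs.drop (i+1))]
              simp
            · rw [if_neg hD, hdrop]
              simp only [← hc]
              have hws2 : cs[i].isWhitespace = false := by rw [hc]; simpa using hws
              have hA2 : cs[i].isAlpha = false := by rw [hc]; simpa using hA
              have hD2 : cs[i].isDigit = false := by rw [hc]; simpa using hD
              have hstep : pvStepB (symbols, [], none) cs[i] =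
                  (symbols ++ [String.mk [cs[i]]], [], none) := by
                simp [pvStepB, hws2, hA2, hD2]
              simp only [List.foldl_cons, hstep]
              exact ih (i+1) (by omega) _
      · rw [if_neg hi, List.drop_eq_nil_of_le (by omega)]
        simp [pvFinishB]

-- ===== VERDICT (by name: the statement is the Claim_ definition above) =====
theorem split_production_spec : Claim_equal_split_production := by
  intro prod _
  unfold Spec_split_production split_production split_production_alt
  simpa using pvMain prod.toList prod.toList.length 0 (by omega) []
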